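-- pv_equiv track=rewrite | github.com/jaredmcgrath/AdventOfCode2019 | Day6_2.py | findAdd
-- ===== SOURCE A (Python) =====
-- def findAdd(raw, d, root):
--     # find the number of children of node root, and add them as values to the dictionary, then recursively call
--     childIdx = [i for i, x in enumerate(raw) if x[0] == root]
--     # break condition for recursion: has no children
--     if not len(childIdx):
--         return d
--     # if there is more than one child, add them
--     else:
--         newLen = d[root][0] + 1
--         for i in childIdx:
--             newVal = raw[i][1]
--             d[newVal] = (newLen, root)
--             findAdd(raw, d, newVal)
--         return d
-- ===== SOURCE B (Python) =====
-- def findAdd(raw, d, root):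
--     # Build a parent->children adjacency dict in one pass, then fill d by a
--     # depth-threading DFS, instead of rescanning raw at every node.
--     children = {}
--     for p, c in raw:
--         children.setdefault(p, []).append(c)
--
--     def visit(node, childDepth):
--         for c in children.get(node, []):
--             d[c] = (childDepth, node)
--             visit(c, childDepth + 1)
--
--     if children.get(root, []):
--         visit(root, d[root][0] + 1)
--     return d
-- ===== Notes on version B (the rewrite author's own statement) =====
-- stated objective: alternative
-- what changed: A rescans the whole edge list at every recursive call to find a node's children and re-reads the parent's depth from d; B builds a parent->children adjacency dict in one pass and runs a DFS that threads the depth down, so the edge list is traversed once.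
import Mathlib
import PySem

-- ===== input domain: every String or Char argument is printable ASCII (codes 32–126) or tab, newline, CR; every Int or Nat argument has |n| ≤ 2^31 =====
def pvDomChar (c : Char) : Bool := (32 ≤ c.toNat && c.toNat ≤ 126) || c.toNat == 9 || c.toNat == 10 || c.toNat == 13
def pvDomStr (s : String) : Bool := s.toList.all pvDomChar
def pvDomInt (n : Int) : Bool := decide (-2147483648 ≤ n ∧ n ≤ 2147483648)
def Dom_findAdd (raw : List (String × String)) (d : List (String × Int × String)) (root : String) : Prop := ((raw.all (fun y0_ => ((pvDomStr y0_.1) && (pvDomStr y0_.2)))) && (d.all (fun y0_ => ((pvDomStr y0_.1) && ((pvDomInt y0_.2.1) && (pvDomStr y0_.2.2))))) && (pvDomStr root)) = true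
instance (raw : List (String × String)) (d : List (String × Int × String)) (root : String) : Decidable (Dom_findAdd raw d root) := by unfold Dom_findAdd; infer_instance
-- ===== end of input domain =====

-- B replaces A's per-node rescans of the whole edge list by a one-pass parent->children
-- adjacency dict followed by a depth-threading DFS (objective: alternative).
-- Both A and B mutate the dict d in place in Python; the equivalence proved here is about
-- the returned dict's items (A and B perform the same mutation).

-- ===== PORT A =====
-- Fuel (raw.length + 1) is only a totality device for Lean: on every input admitted by
-- Pre_findAdd (no cycle reachable from root) the recursion depth is at most raw.length + 1,
-- so the fuel never runs out there. Both ports use the same fuel budget.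
def findAddFuel (raw : List (String × String)) : Nat → PySem.Dict String (Int × String) → String → PySem.Dict String (Int × String)
  | 0, d, _ => d
  | fuel+1, d, root =>
    let childIdx := ((PySem.List.enumerate raw).filter (fun p => p.2.1 == root)).map (·.1)
    if childIdx.length == 0 then d
    else
      match d.get? root with
      | none => d    -- Python raises KeyError here; excluded by Pre_findAdd
      | some v =>
        let newLen := v.1 + 1
        childIdx.foldl (fun dd i =>
          match PySem.List.pyGet? raw i with
          | none => dd   -- unreachable: enumerate yields in-range indices
          | some x => findAddFuel raw fuel (dd.insert x.2 (newLen, root)) x.2) d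

def findAdd (raw : List (String × String)) (d : List (String × Int × String)) (root : String) : List (String × Int × String) :=
  (findAddFuel raw (raw.length + 1) (PySem.Dict.ofList d) root).items

-- ===== PORT B =====
-- children = {}; for p, c in raw: children.setdefault(p, []).append(c)
def pvBuildAdj (raw : List (String × String)) : PySem.Dict String (List String) :=
  raw.foldl (fun ch p => ch.modify p.1 [] (fun l => l ++ [p.2])) PySem.Dict.empty

-- def visit(node, childDepth): for c in children.get(node, []): d[c] = (childDepth, node); visit(c, childDepth + 1)
def pvVisit (adj : PySem.Dict String (List String)) : Nat → PySem.Dict String (Int × String) → String → Int → PySem.Dict String (Int × String)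
  | 0, d, _, _ => d
  | fuel+1, d, node, childDepth =>
    (adj.getD node []).foldl
      (fun dd c => pvVisit adj fuel (dd.insert c (childDepth, node)) c (childDepth + 1)) d

def findAdd_alt (raw : List (String × String)) (d : List (String × Int × String)) (root : String) : List (String × Int × String) :=
  let adj := pvBuildAdj raw
  let dd := PySem.Dict.ofList d
  if (adj.getD root []).isEmpty then dd.items
  else
    match dd.get? root with
    | none => dd.items    -- Python raises KeyError here; excluded by Pre_findAdd
    | some v => (pvVisit adj (raw.length + 1) dd root (v.1 + 1)).items

-- ===== PRECONDITION & SPEC =====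
-- one step of the edge relation on a set of nodes
def pvStep (raw : List (String × String)) (s : PySem.Set String) : PySem.Set String :=
  PySem.Set.update s ((raw.filter (fun e => PySem.Set.contains s e.1)).map (·.2))

-- all nodes reachable from the set s through edges of raw (raw.length iterations close the relation)
def pvReachFrom (raw : List (String × String)) (s : PySem.Set String) : PySem.Set String :=
  Nat.iterate (pvStep raw) raw.length s

-- Pre_ excludes exactly the inputs on which the Python A raises: a KeyError when root has a
-- child in raw but is not a key of d, and a RecursionError when some node reachable from root
-- lies on a cycle of raw (the recursion then never terminates). The two Lean ports happen to
-- agree even outside Pre_ (both return the dict unchanged where Python raises KeyError), so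
-- the equality proof below does not need the Pre_ hypothesis; Pre_ marks where the ports are
-- faithful to the Pythons.
def Pre_findAdd (raw : List (String × String)) (d : List (String × Int × String)) (root : String) : Prop :=
  ((raw.all (fun e => e.1 != root)) = true ∨ root ∈ d.map (·.1)) ∧
  ∀ v ∈ pvReachFrom raw (PySem.Set.ofList [root]),
    v ∉ pvReachFrom raw (PySem.Set.ofList ((raw.filter (fun e => e.1 == v)).map (·.2)))

instance (raw : List (String × String)) (d : List (String × Int × String)) (root : String) : Decidable (Pre_findAdd raw d root) := by unfold Pre_findAdd; infer_instance

def pvWitness_findAdd : (List (String × String)) × (List (String × Int × String)) × String :=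
  ([("COM", "B"), ("B", "C")], [("COM", (0, ""))], "COM")

def Spec_findAdd (raw : List (String × String)) (d : List (String × Int × String)) (root : String) (out : List (String × Int × String)) : Prop := out = findAdd_alt raw d root
instance (raw : List (String × String)) (d : List (String × Int × String)) (root : String) (out : List (String × Int × String)) : Decidable (Spec_findAdd raw d root out) := by unfold Spec_findAdd; infer_instance

-- ===== CLAIM (what is proved, stated in full; the proofs are below) =====
def Claim_equal_findAdd : Prop := ∀ (raw : List (String × String)) (d : List (String × Int × String)) (root : String), Dom_findAdd raw d root → Pre_findAdd raw d root → Spec_findAdd raw d root (findAdd raw d root)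

-- ===== LEMMAS AND PROOFS =====

-- the (index, edge) pairs A's comprehension selects for a node
def pvPairs (raw : List (String × String)) (node : String) : List (Int × (String × String)) :=
  (PySem.List.enumerate raw).filter (fun p => p.2.1 == node)

theorem pv_pairs_snd_aux (node : String) :
    ∀ (raw : List (String × String)) (s : Int),
      ((PySem.List.enumerate raw s).filter (fun p => p.2.1 == node)).map (·.2)
        = raw.filter (fun e => e.1 == node)
  | [], _ => by simp [PySem.List.enumerate_nil]
  | e :: raw, s => by
    rw [PySem.List.enumerate_cons]
    by_cases he : e.1 == node
    · simp only [List.filter_cons, he, if_pos, List.map_cons]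
      rw [pv_pairs_snd_aux node raw (s + 1)]
    · simp only [List.filter_cons, he, Bool.false_eq_true, if_false]
      exact pv_pairs_snd_aux node raw (s + 1)

theorem pv_pairs_snd (raw : List (String × String)) (node : String) :
    (pvPairs raw node).map (·.2) = raw.filter (fun e => e.1 == node) :=
  pv_pairs_snd_aux node raw 0

theorem pv_pairs_nil_iff (raw : List (String × String)) (node : String) :
    pvPairs raw node = [] ↔ raw.filter (fun e => e.1 == node) = [] := by
  rw [← pv_pairs_snd]
  simp

-- B's adjacency lookup returns exactly the children A's rescans find
theorem pv_adj_getD (raw : List (String × String)) (node : String) :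
    (pvBuildAdj raw).getD node [] = (raw.filter (fun e => e.1 == node)).map (·.2) := by
  unfold pvBuildAdj
  rw [PySem.Dict.getD_foldl_modify_append]
  simp

-- folding A's index list with a raw[i]-lookup body is folding the child list itself
theorem pv_childIdx_foldl (raw : List (String × String)) (node : String) {β : Type}
    (g : β → String → β) (init : β) :
    ((pvPairs raw node).map (·.1)).foldl
      (fun dd i => match PySem.List.pyGet? raw i with | none => dd | some x => g dd x.2) init
    = (((raw.filter (fun e => e.1 == node)).map (·.2))).foldl g init := by
  rw [List.foldl_map, ← pv_pairs_snd, List.map_map, List.foldl_map]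
  apply PySem.List.foldl_congr_mem
  intro acc p hp
  have hp' : p ∈ PySem.List.enumerate raw := List.mem_of_mem_filter hp
  rw [PySem.List.mem_enumerate_iff] at hp'
  obtain ⟨k, hk, rfl⟩ := hp'
  simp [pysem, hk]

theorem pv_visit_eq (raw : List (String × String)) (fuel : Nat) :
    ∀ (d : PySem.Dict String (Int × String)) (node : String) (x : Int),
      (d.get? node).map (·.1) = some x →
      pvVisit (pvBuildAdj raw) fuel d node (x + 1) = findAddFuel raw fuel d node := by
  induction fuel with
  | zero => intro d node x _; rfl
  | succ fuel ih =>
    intro d node x h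
    obtain ⟨v, hv, hx⟩ := Option.map_eq_some_iff.mp h
    simp only [pvVisit, findAddFuel, pv_adj_getD]
    by_cases hnil : raw.filter (fun e => e.1 == node) = []
    · have hp : (PySem.List.enumerate raw).filter (fun p => p.2.1 == node) = [] := by
        simpa [pvPairs] using (pv_pairs_nil_iff raw node).mpr hnil
      rw [hnil, hp]
      simp
    · have hp : (PySem.List.enumerate raw).filter (fun p => p.2.1 == node) ≠ [] := by
        intro hc
        exact hnil ((pv_pairs_nil_iff raw node).mp (by simpa [pvPairs] using hc))
      have hlen : ((((PySem.List.enumerate raw).filter (fun p => p.2.1 == node)).map (·.1)).length == 0) = false := by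
        simp [List.length_eq_zero_iff, hp]
      rw [hlen]
      simp only [Bool.false_eq_true, if_false]
      simp only [hv]
      have hfold := pv_childIdx_foldl raw node
        (fun dd c => findAddFuel raw fuel (dd.insert c (v.1 + 1, node)) c) d
      simp only [pvPairs] at hfold
      rw [hfold, hx]
      apply PySem.List.foldl_congr_mem
      intro acc c _
      exact ih (acc.insert c (x + 1, node)) c (x + 1)
        (by rw [PySem.Dict.get?_insert_self]; rfl)

-- ===== VERDICT (by name: the statement is the Claim_ definition above) =====
theorem findAdd_spec : Claim_equal_findAdd := by
  unfold Claim_equal_findAdd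
  intro raw d root _ _
  unfold Spec_findAdd findAdd findAdd_alt
  by_cases hnil : raw.filter (fun e => e.1 == root) = []
  · have hp : (PySem.List.enumerate raw).filter (fun p => p.2.1 == root) = [] := by
      simpa [pvPairs] using (pv_pairs_nil_iff raw root).mpr hnil
    rw [findAddFuel]
    simp [hp, pv_adj_getD, hnil]
  · have hp : (PySem.List.enumerate raw).filter (fun p => p.2.1 == root) ≠ [] := by
      intro hc
      exact hnil ((pv_pairs_nil_iff raw root).mp (by simpa [pvPairs] using hc))
    have hB : ((pvBuildAdj raw).getD root []).isEmpty = false := by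
      rw [pv_adj_getD]
      simp [hnil]
    have hlen : ((((PySem.List.enumerate raw).filter (fun p => p.2.1 == root)).map (·.1)).length == 0) = false := by
      simp [List.length_eq_zero_iff, hp]
    simp only [hB, Bool.false_eq_true, if_false]
    cases hget : (PySem.Dict.ofList d).get? root with
    | none =>
      rw [findAddFuel]
      simp [hget]
    | some v =>
      rw [← pv_visit_eq raw (raw.length + 1) (PySem.Dict.ofList d) root v.1 (by rw [hget]; rfl)]
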